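-- pv_equiv track=rewrite | github.com/UmADuck/Algo_labs_sem_3 | main.py | find_liked_beers_by_workers
-- ===== SOURCE A (Python) =====
-- def find_liked_beers_by_workers(answers, workers, beers):
--
--     # Creating array of workers with their liked beers
--
--     liked_beers_by_worker_index = []
--
--     # Creating array of likes beers
--
--     liked_beers = []
--
--     for i in range(workers):
--         worker_beers = []
--         for j in range(beers):
--             if answers[i][j] == "Y":
--                 worker_beers.append((j + 1))
--                 liked_beers.append(j + 1)
--         liked_beers_by_worker_index.append(worker_beers.copy())
--         worker_beers.clear()
--     return liked_beers_by_worker_index, liked_beers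
-- ===== SOURCE B (Python) =====
-- def find_liked_beers_by_workers(answers, workers, beers):
--     # Phase 1: one row-major pass producing only the flat list of liked beers.
--     flat = [j + 1 for i in range(workers) for j in range(beers) if answers[i][j] == "Y"]
--     # Phase 2: per-worker like counts.
--     counts = [sum(1 for j in range(beers) if answers[i][j] == "Y") for i in range(workers)]
--     # Phase 3: recover the per-worker grouping by slicing the flat list with the counts.
--     per_worker = []
--     pos = 0
--     for c in counts:
--         per_worker.append(flat[pos:pos + c])
--         pos += c
--     return per_worker, flat
-- ===== Notes on version B (the rewrite author's own statement) =====
-- stated objective: alternative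
-- what changed: Instead of building the nested and flat lists together in one fused loop, B first builds only the flat row-major list of liked beers, separately computes each worker's like count, and then reconstructs the per-worker lists by slicing the flat list at the count boundaries.
import Mathlib
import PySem

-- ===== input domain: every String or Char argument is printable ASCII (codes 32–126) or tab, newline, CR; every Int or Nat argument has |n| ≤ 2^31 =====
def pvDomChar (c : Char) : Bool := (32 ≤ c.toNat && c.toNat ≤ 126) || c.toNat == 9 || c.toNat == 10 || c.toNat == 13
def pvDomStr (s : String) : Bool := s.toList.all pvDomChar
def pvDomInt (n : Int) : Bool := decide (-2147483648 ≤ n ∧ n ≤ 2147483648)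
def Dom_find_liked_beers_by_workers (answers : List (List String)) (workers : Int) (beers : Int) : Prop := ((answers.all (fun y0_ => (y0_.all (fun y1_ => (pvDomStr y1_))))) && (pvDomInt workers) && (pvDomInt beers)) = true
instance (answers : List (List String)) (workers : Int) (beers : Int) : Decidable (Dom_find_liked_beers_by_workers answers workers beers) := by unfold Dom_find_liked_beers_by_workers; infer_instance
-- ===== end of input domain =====

-- B replaces A's fused two-accumulator loop by: build the flat list alone, compute per-worker
-- counts, then reconstruct the per-worker lists by slicing the flat list (alternative decomposition, same cost).

-- ===== PORT A =====
-- fused loop: one fold over workers carrying (liked_beers_by_worker_index, liked_beers);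
-- inner fold over beers carrying (worker_beers, liked_beers)
def find_liked_beers_by_workers (answers : List (List String)) (workers : Int) (beers : Int) : List (List Int) × List Int :=
  (PySem.List.pyRange 0 workers 1).foldl
    (fun (st : List (List Int) × List Int) i =>
      let wb := (PySem.List.pyRange 0 beers 1).foldl
        (fun (p : List Int × List Int) j =>
          if PySem.List.pyGetD (PySem.List.pyGetD answers i []) j "" == "Y" then
            (p.1 ++ [j + 1], p.2 ++ [j + 1])
          else p)
        ([], st.2)
      (st.1 ++ [wb.1], wb.2))
    ([], [])

-- ===== PORT B =====
-- phase 1: flat row-major comprehension; phase 2: per-worker counts (sum of 1s);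
-- phase 3: slice the flat list at the count boundaries
def find_liked_beers_by_workers_alt (answers : List (List String)) (workers : Int) (beers : Int) : List (List Int) × List Int :=
  let flat := (PySem.List.pyRange 0 workers 1).flatMap (fun i =>
    ((PySem.List.pyRange 0 beers 1).filter
      (fun j => PySem.List.pyGetD (PySem.List.pyGetD answers i []) j "" == "Y")).map (· + 1))
  let counts := (PySem.List.pyRange 0 workers 1).map (fun i =>
    ((PySem.List.pyRange 0 beers 1).filter
      (fun j => PySem.List.pyGetD (PySem.List.pyGetD answers i []) j "" == "Y")).foldl
      (fun s _ => s + 1) (0 : Int))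
  let split := counts.foldl
    (fun (st : List (List Int) × Int) c =>
      (st.1 ++ [PySem.List.slice flat (some st.2) (some (st.2 + c))], st.2 + c))
    ([], 0)
  (split.1, flat)

-- ===== PRECONDITION & SPEC =====
-- Pre_: exactly the inputs where Python A's answers[i][j] never raises an IndexError:
-- if any inner iteration runs (0 < beers), the first workers rows must exist and
-- each have at least beers entries.
def Pre_find_liked_beers_by_workers (answers : List (List String)) (workers : Int) (beers : Int) : Prop :=
  0 < beers →
    workers ≤ (answers.length : Int) ∧
    ∀ row ∈ answers.take workers.toNat, beers ≤ (row.length : Int)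
instance (answers : List (List String)) (workers : Int) (beers : Int) : Decidable (Pre_find_liked_beers_by_workers answers workers beers) := by unfold Pre_find_liked_beers_by_workers; infer_instance

def pvWitness_find_liked_beers_by_workers : List (List String) × Int × Int :=
  ([["Y", "N"], ["N", "Y"]], 2, 2)

def Spec_find_liked_beers_by_workers (answers : List (List String)) (workers : Int) (beers : Int) (out : List (List Int) × List Int) : Prop := out = find_liked_beers_by_workers_alt answers workers beers
instance (answers : List (List String)) (workers : Int) (beers : Int) (out : List (List Int) × List Int) : Decidable (Spec_find_liked_beers_by_workers answers workers beers out) := by unfold Spec_find_liked_beers_by_workers; infer_instance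

-- ===== CLAIM (what is proved, stated in full; the proofs are below) =====
def Claim_equal_find_liked_beers_by_workers : Prop := ∀ (answers : List (List String)) (workers : Int) (beers : Int), Dom_find_liked_beers_by_workers answers workers beers → Pre_find_liked_beers_by_workers answers workers beers → Spec_find_liked_beers_by_workers answers workers beers (find_liked_beers_by_workers answers workers beers)

-- ===== LEMMAS AND PROOFS =====

-- A's inner loop appends (filter-then-map of the range) to both accumulators.
theorem inner_fold_eq (c : Int → Bool) (L : List Int) (w l : List Int) :
    L.foldl (fun (p : List Int × List Int) j =>
        if c j then (p.1 ++ [j + 1], p.2 ++ [j + 1]) else p) (w, l)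
      = (w ++ (L.filter c).map (· + 1), l ++ (L.filter c).map (· + 1)) := by
  induction L generalizing w l with
  | nil => simp
  | cons x xs ih =>
    by_cases h : c x <;> simp [h, ih]

-- A's outer loop builds the map and its flattening.
theorem outer_fold_eq (row : Int → List Int) (L : List Int) (a : List (List Int)) (b : List Int) :
    L.foldl (fun (st : List (List Int) × List Int) i =>
        (st.1 ++ [row i], st.2 ++ row i)) (a, b)
      = (a ++ L.map row, b ++ (L.map row).flatten) := by
  induction L generalizing a b with
  | nil => simp
  | cons x xs ih => simp [ih, List.append_assoc]

-- B's count comprehension is the length.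
theorem count_fold_eq (L : List Int) (s : Int) :
    L.foldl (fun t _ => t + 1) s = s + (L.length : Int) := by
  induction L generalizing s with
  | nil => simp
  | cons x xs ih => simp [ih]; omega

-- B's splitting loop recovers the rows from the flat list.
theorem split_fold_eq (F : List Int) (rs : List (List Int)) (pre suf : List Int)
    (acc : List (List Int)) (hF : F = pre ++ rs.flatten ++ suf) :
    (rs.map (fun r => (r.length : Int))).foldl
        (fun (st : List (List Int) × Int) c =>
          (st.1 ++ [PySem.List.slice F (some st.2) (some (st.2 + c))], st.2 + c))
        (acc, (pre.length : Int))
      = (acc ++ rs, ((pre.length : Int) + (rs.flatten.length : Int))) := by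
  induction rs generalizing pre acc with
  | nil => simp
  | cons r rs ih =>
    simp only [List.map_cons, List.foldl_cons]
    rw [PySem.List.slice_natCast_add]
    have hdrop : F.drop pre.length = r ++ (rs.flatten ++ suf) := by
      simp [hF, List.append_assoc]
    have hr : (F.drop pre.length).take r.length = r := by
      rw [hdrop]; simp
    rw [hr]
    have hcast : (pre.length : Int) + (r.length : Int) = (((pre ++ r).length : Nat) : Int) := by
      simp
    rw [hcast, ih (pre ++ r) (acc ++ [r]) (by simp [hF, List.append_assoc])]
    simp
    omega

-- ===== VERDICT (by name: the statement is the Claim_ definition above) =====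
theorem find_liked_beers_by_workers_spec : Claim_equal_find_liked_beers_by_workers := by
  intro answers workers beers _ _
  unfold Spec_find_liked_beers_by_workers find_liked_beers_by_workers find_liked_beers_by_workers_alt
  set row := fun i =>
    ((PySem.List.pyRange 0 beers 1).filter
      (fun j => PySem.List.pyGetD (PySem.List.pyGetD answers i []) j "" == "Y")).map
      (fun x => x + 1) with hrow
  -- A's side reduces to (map row, flatten)
  have hA :
      (PySem.List.pyRange 0 workers 1).foldl
        (fun (st : List (List Int) × List Int) i =>
          let wb := (PySem.List.pyRange 0 beers 1).foldl
            (fun (p : List Int × List Int) j =>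
              if PySem.List.pyGetD (PySem.List.pyGetD answers i []) j "" == "Y" then
                (p.1 ++ [j + 1], p.2 ++ [j + 1])
              else p)
            ([], st.2)
          (st.1 ++ [wb.1], wb.2))
        ([], [])
      = (((PySem.List.pyRange 0 workers 1).map row),
         ((PySem.List.pyRange 0 workers 1).map row).flatten) := by
    have h1 :
        (PySem.List.pyRange 0 workers 1).foldl
          (fun (st : List (List Int) × List Int) i =>
            let wb := (PySem.List.pyRange 0 beers 1).foldl
              (fun (p : List Int × List Int) j =>
                if PySem.List.pyGetD (PySem.List.pyGetD answers i []) j "" == "Y" then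
                  (p.1 ++ [j + 1], p.2 ++ [j + 1])
                else p)
              ([], st.2)
            (st.1 ++ [wb.1], wb.2))
          ([], [])
        = (PySem.List.pyRange 0 workers 1).foldl
            (fun (st : List (List Int) × List Int) i =>
              (st.1 ++ [row i], st.2 ++ row i)) ([], []) := by
      apply PySem.List.foldl_congr_mem
      intro st i _
      rw [inner_fold_eq (fun j => PySem.List.pyGetD (PySem.List.pyGetD answers i []) j "" == "Y")]
      simp [hrow]
    rw [h1, outer_fold_eq]
    simp
  rw [hA]
  -- B's side: flat = flatten, counts = lengths, splitting recovers the rows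
  have hflat :
      (PySem.List.pyRange 0 workers 1).flatMap row
        = ((PySem.List.pyRange 0 workers 1).map row).flatten := by
    simp [List.flatMap_def]
  have hcounts :
      (PySem.List.pyRange 0 workers 1).map (fun i =>
        ((PySem.List.pyRange 0 beers 1).filter
          (fun j => PySem.List.pyGetD (PySem.List.pyGetD answers i []) j "" == "Y")).foldl
          (fun s _ => s + 1) (0 : Int))
        = ((PySem.List.pyRange 0 workers 1).map row).map (fun r => (r.length : Int)) := by
    simp [count_fold_eq, hrow]
  simp only [hflat, hcounts]
  have := split_fold_eq (((PySem.List.pyRange 0 workers 1).map row).flatten)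
    ((PySem.List.pyRange 0 workers 1).map row) [] [] [] (by simp)
  simp only [List.length_nil, Nat.cast_zero] at this
  rw [this]
  simp
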